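-- pv_equiv track=rewrite | github.com/haowei614/ArgRE-code | src/openre_bench/argumentation/af_solver.py | _characteristic_function
-- ===== SOURCE A (Python) =====
-- def _characteristic_function(
--     extension: set[str],
--     argument_ids: list[str],
--     attack_pairs: set[tuple[str, str]],
-- ) -> set[str]:
--     accepted: set[str] = set()
--     for candidate in argument_ids:
--         attackers = _attackers_of(candidate, attack_pairs)
--         if all(_is_attacked_by_some(attacker, extension, attack_pairs) for attacker in attackers):
--             accepted.add(candidate)
--     return accepted
--
-- def _attackers_of(target: str, attack_pairs: set[tuple[str, str]]) -> set[str]: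
--     return {attacker for attacker, attacked in attack_pairs if attacked == target}
--
-- def _is_attacked_by_some(
--     target: str,
--     attackers: set[str],
--     attack_pairs: set[tuple[str, str]],
-- ) -> bool:
--     return any((attacker, target) in attack_pairs for attacker in attackers)
-- ===== SOURCE B (Python) =====
-- def _characteristic_function(
--     extension: set[str],
--     argument_ids: list[str],
--     attack_pairs: set[tuple[str, str]],
-- ) -> set[str]:
--     # one pass: everything attacked by the extension
--     attacked_by_ext = {t for (e, t) in attack_pairs if e in extension}
--     # one pass: everything with at least one attacker NOT neutralised by the extension
--     undefended = {c for (a, c) in attack_pairs if a not in attacked_by_ext}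
--     # defended = candidates with no undefended attack against them
--     return {c for c in argument_ids if c not in undefended}
-- ===== Notes on version B (the rewrite author's own statement) =====
-- stated objective: faster
-- what changed: Replaces A's per-candidate attacker-set construction and nested attacked-by-extension scans with two single passes over attack_pairs (building the attacked-by-extension set, then the undefended-targets set) followed by a complement filter over argument_ids.
import Mathlib
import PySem

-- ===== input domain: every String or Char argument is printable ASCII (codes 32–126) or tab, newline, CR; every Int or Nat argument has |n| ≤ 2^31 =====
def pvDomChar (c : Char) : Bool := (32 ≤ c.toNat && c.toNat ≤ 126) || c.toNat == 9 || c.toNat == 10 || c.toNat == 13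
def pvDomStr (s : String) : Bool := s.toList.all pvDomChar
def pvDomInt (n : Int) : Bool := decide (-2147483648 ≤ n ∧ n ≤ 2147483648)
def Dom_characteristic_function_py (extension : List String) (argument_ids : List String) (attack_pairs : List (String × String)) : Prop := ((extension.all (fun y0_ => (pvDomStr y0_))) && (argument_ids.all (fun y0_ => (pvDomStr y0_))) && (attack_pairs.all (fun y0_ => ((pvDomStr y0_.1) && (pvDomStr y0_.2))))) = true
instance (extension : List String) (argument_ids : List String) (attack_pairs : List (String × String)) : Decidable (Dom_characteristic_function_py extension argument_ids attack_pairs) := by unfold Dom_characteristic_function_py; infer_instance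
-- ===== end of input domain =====

-- B replaces A's per-candidate nested attacker scans by two passes over the attack pairs
-- (attacked-by-extension set, then undefended set) and a complement filter (objective: faster).

-- ===== PORT A =====
-- _attackers_of
def pvAttackersOf (target : String) (attack_pairs : List (String × String)) : PySem.Set String :=
  PySem.Set.ofList ((attack_pairs.filter (fun p => p.2 == target)).map Prod.fst)

-- _is_attacked_by_some
def pvIsAttackedBySome (target : String) (attackers : List String) (attack_pairs : List (String × String)) : Bool :=
  attackers.any (fun attacker => attack_pairs.contains (attacker, target))

def characteristic_function_py (extension : List String) (argument_ids : List String) (attack_pairs : List (String × String)) : List String :=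
  argument_ids.foldl (fun accepted candidate =>
    let attackers := pvAttackersOf candidate attack_pairs
    if attackers.all (fun attacker => pvIsAttackedBySome attacker extension attack_pairs)
    then PySem.Set.add accepted candidate else accepted) PySem.Set.empty

-- ===== PORT B =====
def characteristic_function_py_alt (extension : List String) (argument_ids : List String) (attack_pairs : List (String × String)) : List String :=
  let attackedByExt : PySem.Set String :=
    PySem.Set.ofList ((attack_pairs.filter (fun p => extension.contains p.1)).map Prod.snd)
  let undefended : PySem.Set String :=
    PySem.Set.ofList ((attack_pairs.filter (fun p => !(PySem.Set.contains attackedByExt p.1))).map Prod.snd)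
  PySem.Set.ofList (argument_ids.filter (fun c => !(PySem.Set.contains undefended c)))

-- ===== PRECONDITION & SPEC =====
def Spec_characteristic_function_py (extension : List String) (argument_ids : List String) (attack_pairs : List (String × String)) (out : List String) : Prop := out = characteristic_function_py_alt extension argument_ids attack_pairs
instance (extension : List String) (argument_ids : List String) (attack_pairs : List (String × String)) (out : List String) : Decidable (Spec_characteristic_function_py extension argument_ids attack_pairs out) := by unfold Spec_characteristic_function_py; infer_instance

-- ===== CLAIM (what is proved, stated in full; the proofs are below) =====
def Claim_equal_characteristic_function_py : Prop := ∀ (extension : List String) (argument_ids : List String) (attack_pairs : List (String × String)), Dom_characteristic_function_py extension argument_ids attack_pairs → Spec_characteristic_function_py extension argument_ids attack_pairs (characteristic_function_py extension argument_ids attack_pairs)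

-- ===== LEMMAS AND PROOFS =====

-- A's guarded fold is the fold of Set.add over the filtered list.
theorem foldl_add_if_eq_filter {α : Type} [BEq α] (p : α → Bool) (l : List α) (s : PySem.Set α) :
    l.foldl (fun acc c => if p c then PySem.Set.add acc c else acc) s
      = (l.filter p).foldl PySem.Set.add s := by
  induction l generalizing s with
  | nil => rfl
  | cons x xs ih =>
    simp only [List.foldl_cons, List.filter_cons]
    by_cases h : p x = true
    · simp [h, ih]
    · simp [h, ih]

-- The two acceptance tests agree on every candidate.
theorem pred_eq (extension : List String) (attack_pairs : List (String × String)) (c : String) :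
    ((pvAttackersOf c attack_pairs).all
        (fun attacker => pvIsAttackedBySome attacker extension attack_pairs))
      = !(PySem.Set.contains
            (PySem.Set.ofList ((attack_pairs.filter
              (fun p => !(PySem.Set.contains
                (PySem.Set.ofList ((attack_pairs.filter (fun p => extension.contains p.1)).map Prod.snd)) p.1))).map Prod.snd)) c) := by
  rw [Bool.eq_iff_iff]
  simp only [List.all_eq_true, pvAttackersOf, pvIsAttackedBySome, Bool.not_eq_true',
    PySem.Set.contains_eq_listContains, ← Bool.not_eq_true, List.contains_iff_mem,
    PySem.Set.mem_ofList, List.mem_map, List.mem_filter, List.any_eq_true, beq_iff_eq]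
  constructor
  · intro h hex
    obtain ⟨q, ⟨hq, hnb⟩, hq2⟩ := hex
    obtain ⟨e, he, hep⟩ := h q.1 ⟨q, ⟨hq, hq2⟩, rfl⟩
    exact hnb ⟨(e, q.1), ⟨hep, he⟩, rfl⟩
  · intro h a ha
    obtain ⟨q, ⟨hq, hq2⟩, rfl⟩ := ha
    by_contra hno
    push Not at hno
    apply h
    refine ⟨q, ⟨hq, ?_⟩, hq2⟩
    rintro ⟨r, ⟨hr, hr1⟩, hr2⟩
    have hrq : r = (r.1, q.1) := by cases r; simp_all
    exact hno r.1 hr1 (hrq ▸ hr)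

-- ===== VERDICT (by name: the statement is the Claim_ definition above) =====
theorem characteristic_function_py_spec : Claim_equal_characteristic_function_py := by
  intro extension argument_ids attack_pairs _
  unfold Spec_characteristic_function_py characteristic_function_py characteristic_function_py_alt
  rw [foldl_add_if_eq_filter, PySem.Set.ofList_eq_foldl]
  congr 1
  exact List.filter_congr (fun c _ => pred_eq extension attack_pairs c)
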